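-- pv_equiv track=rewrite | github.com/bugbuger97/Baejoon_sol | 백준/Bronze/2525. 오븐 시계/오븐 시계.py | Cooking_done
-- ===== SOURCE A (Python) =====
-- def Cooking_done(h,m,c) -> str:
--   m += c
--   while m >= 60:
--     m -= 60
--     h += 1
--   if h >= 24:
--     h -= 24
--     return f'{h} {m}'
--   else:
--     return f'{h} {m}'
-- ===== SOURCE B (Python) =====
-- def Cooking_done(h, m, c) -> str:
--     # closed-form carry instead of repeated subtraction
--     m += c
--     if m >= 60:
--         h += m // 60
--         m %= 60
--     if h >= 24:
--         h -= 24
--     return f'{h} {m}'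
-- ===== Notes on version B (the rewrite author's own statement) =====
-- stated objective: simpler
-- what changed: Replaces the O(m/60) repeated-subtraction while loop with a single guarded divmod (h += m//60; m %= 60), keeping the one-shot 24-hour wrap.
import Mathlib
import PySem

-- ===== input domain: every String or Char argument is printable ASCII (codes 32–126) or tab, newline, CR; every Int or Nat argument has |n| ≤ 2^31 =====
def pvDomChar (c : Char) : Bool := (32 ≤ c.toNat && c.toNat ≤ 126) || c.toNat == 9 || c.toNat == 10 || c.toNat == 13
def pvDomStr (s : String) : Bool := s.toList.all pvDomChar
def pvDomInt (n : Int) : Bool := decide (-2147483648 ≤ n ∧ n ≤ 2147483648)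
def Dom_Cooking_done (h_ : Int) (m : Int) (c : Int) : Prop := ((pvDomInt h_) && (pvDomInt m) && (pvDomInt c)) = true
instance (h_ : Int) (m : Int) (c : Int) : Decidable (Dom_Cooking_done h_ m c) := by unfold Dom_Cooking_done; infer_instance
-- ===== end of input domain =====

-- B replaces A's repeated-subtraction while loop with one guarded divmod carry; objective: simpler.

-- ===== PORT A =====
-- the 'while m >= 60: m -= 60; h += 1' loop of A
def cookLoop (h m : Int) : Int × Int :=
  if 60 ≤ m then cookLoop (h + 1) (m - 60) else (h, m)
termination_by m.toNat
decreasing_by omega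

def Cooking_done (h_ : Int) (m : Int) (c : Int) : String :=
  let m1 := m + c
  let p := cookLoop h_ m1
  if 24 ≤ p.1 then PySem.Int.toStr (p.1 - 24) ++ " " ++ PySem.Int.toStr p.2
  else PySem.Int.toStr p.1 ++ " " ++ PySem.Int.toStr p.2

-- ===== PORT B =====
def Cooking_done_alt (h_ : Int) (m : Int) (c : Int) : String :=
  let m1 := m + c
  let hm : Int × Int :=
    if 60 ≤ m1 then (h_ + PySem.Int.floordiv m1 60, PySem.Int.mod m1 60) else (h_, m1)
  let h3 := if 24 ≤ hm.1 then hm.1 - 24 else hm.1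
  PySem.Int.toStr h3 ++ " " ++ PySem.Int.toStr hm.2

-- ===== PRECONDITION & SPEC =====
def Spec_Cooking_done (h_ : Int) (m : Int) (c : Int) (out : String) : Prop := out = Cooking_done_alt h_ m c
instance (h_ : Int) (m : Int) (c : Int) (out : String) : Decidable (Spec_Cooking_done h_ m c out) := by unfold Spec_Cooking_done; infer_instance

-- ===== CLAIM (what is proved, stated in full; the proofs are below) =====
def Claim_equal_Cooking_done : Prop := ∀ (h_ : Int) (m : Int) (c : Int), Dom_Cooking_done h_ m c → Spec_Cooking_done h_ m c (Cooking_done h_ m c)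

-- ===== LEMMAS AND PROOFS =====

theorem cookLoop_eq_divmod (m : Int) (hm : 60 ≤ m) :
    ∀ h : Int, cookLoop h m = (h + PySem.Int.floordiv m 60, PySem.Int.mod m 60) := by
  rw [PySem.Int.floordiv_eq_ediv_of_pos (by norm_num), PySem.Int.mod_eq_emod_of_pos (by norm_num)]
  induction hn : m.toNat using Nat.strong_induction_on generalizing m with
  | _ n ih =>
    intro h
    rw [cookLoop, if_pos hm]
    by_cases h2 : 60 ≤ m - 60
    · rw [ih (m - 60).toNat (by omega) (m - 60) h2 rfl (h + 1)]
      refine Prod.ext ?_ ?_ <;> simp <;> omega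
    · rw [cookLoop, if_neg h2]
      refine Prod.ext ?_ ?_ <;> simp <;> omega

theorem cookLoop_stay (h m : Int) (hm : ¬ 60 ≤ m) : cookLoop h m = (h, m) := by
  rw [cookLoop, if_neg hm]

-- ===== VERDICT (by name: the statement is the Claim_ definition above) =====
theorem Cooking_done_spec : Claim_equal_Cooking_done := by
  intro h_ m c _
  show Cooking_done h_ m c = Cooking_done_alt h_ m c
  simp only [Cooking_done, Cooking_done_alt]
  by_cases hc : 60 ≤ m + c
  · rw [cookLoop_eq_divmod (m + c) hc h_]
    simp only [if_pos hc]
    split_ifs with h24 <;> simp_all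
  · rw [cookLoop_stay h_ (m + c) hc]
    simp only [if_neg hc]
    split_ifs with h24 <;> simp_all
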